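-- pv_equiv track=rewrite | github.com/barret50cal3011/Reto1 | Reto1.py | palabras_iguales
-- ===== SOURCE A (Python) =====
-- def is_equal(palabra1, palabra2):
--     for char in palabra2:
--         if(not char in palabra1):
--             return False;
--     return True;
--
-- def palabras_iguales(lst):
--     words_dict = {};
--     for word in lst:
--         if(len(words_dict) == 0):
--             words_dict[word] = [word];
--         else:
--             is_different = True;
--             for key in words_dict:
--                 if(is_equal(key, word)):
--                     words_dict[key].append(word);
--                     is_different = False;
--             if is_different:
--                 words_dict[word] = [word];
--
--     res = []
--     for key in words_dict:
--         if(len(words_dict[key]) > 1):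
--             res.append(words_dict[key]);
--     return res;
-- ===== SOURCE B (Python) =====
-- def palabras_iguales(lst):
--     # Pass 1: pick key words: a word becomes a key iff its char-set is not
--     # contained in any already-chosen key's char-set; remember the words after it.
--     keys = []  # (key word, its char set, words occurring after it)
--     for i, w in enumerate(lst):
--         cs = set(w)
--         if all(not cs <= k_cs for _, k_cs, _ in keys):
--             keys.append((w, cs, lst[i + 1:]))
--     # Pass 2: each key's group is the key followed by the later words whose
--     # char-set is contained in the key's; keep groups of more than one word.
--     res = []
--     for k, k_cs, rest in keys:
--         group = [k] + [w for w in rest if set(w) <= k_cs]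
--         if len(group) > 1:
--             res.append(group)
--     return res
-- ===== Notes on version B (the rewrite author's own statement) =====
-- stated objective: alternative
-- what changed: Replaces A's single interleaved dict-building pass (append-as-you-go with a live key scan and a flag) by two separate passes: pass 1 selects the key words (a word becomes a key iff its char-set is not a subset of any earlier key's set, tested via Python sets), pass 2 builds each key's group from the words after it and filters groups of size > 1.
import Mathlib
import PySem

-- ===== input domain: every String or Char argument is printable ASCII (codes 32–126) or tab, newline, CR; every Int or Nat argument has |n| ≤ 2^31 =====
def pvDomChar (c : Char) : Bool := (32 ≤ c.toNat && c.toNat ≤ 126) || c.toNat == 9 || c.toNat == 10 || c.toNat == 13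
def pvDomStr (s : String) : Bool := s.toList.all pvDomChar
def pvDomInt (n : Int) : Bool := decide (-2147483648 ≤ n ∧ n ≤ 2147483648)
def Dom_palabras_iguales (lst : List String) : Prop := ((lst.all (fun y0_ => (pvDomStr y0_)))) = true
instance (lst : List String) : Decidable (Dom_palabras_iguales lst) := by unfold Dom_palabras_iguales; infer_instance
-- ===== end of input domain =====

-- B separates key selection from member collection (two passes over the list)
-- instead of A's single interleaved dict-building pass; same cost, different decomposition.

-- ===== PORT A =====
def is_equal (palabra1 palabra2 : String) : Bool :=
  palabra2.toList.all (fun c => palabra1.toList.contains c)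

def palabras_iguales (lst : List String) : List (List String) :=
  let wd := lst.foldl (fun (wd : PySem.Dict String (List String)) word =>
    if wd.size == 0 then wd.insert word [word]
    else
      let st := wd.keys.foldl
        (fun (st : PySem.Dict String (List String) × Bool) key =>
          if is_equal key word then (st.1.modify key [] (fun l => l ++ [word]), false)
          else st) (wd, true)
      if st.2 then st.1.insert word [word] else st.1) (PySem.Dict.mk [])
  wd.keys.foldl (fun res key =>
    if (wd.getD key []).length > 1 then res ++ [wd.getD key []] else res) []

-- ===== PORT B =====
def charSet (w : String) : PySem.Set Char := PySem.Set.ofList w.toList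

def palabras_iguales_alt (lst : List String) : List (List String) :=
  let keys := (PySem.List.enumerate lst).foldl
    (fun (keys : List (String × PySem.Set Char × List String)) iw =>
      if keys.all (fun k => !(PySem.Set.issubset (charSet iw.2) k.2.1)) then
        keys ++ [(iw.2, charSet iw.2, PySem.List.slice lst (some (iw.1 + 1)) none)]
      else keys) []
  keys.foldl (fun res k =>
    let group := k.1 :: k.2.2.filter (fun w => PySem.Set.issubset (charSet w) k.2.1)
    if group.length > 1 then res ++ [group] else res) []

-- ===== PRECONDITION & SPEC =====
def Spec_palabras_iguales (lst : List String) (out : List (List String)) : Prop := out = palabras_iguales_alt lst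
instance (lst : List String) (out : List (List String)) : Decidable (Spec_palabras_iguales lst out) := by unfold Spec_palabras_iguales; infer_instance

-- ===== CLAIM (what is proved, stated in full; the proofs are below) =====
def Claim_equal_palabras_iguales : Prop := ∀ (lst : List String), Dom_palabras_iguales lst → Spec_palabras_iguales lst (palabras_iguales lst)

-- ===== LEMMAS AND PROOFS =====

-- the common model both proofs are reduced to: one step of group building on an association list
def pvStep (gs : List (String × List String)) (w : String) : List (String × List String) :=
  if gs.any (fun kv => is_equal kv.1 w) then
    gs.map (fun kv => if is_equal kv.1 w then (kv.1, kv.2 ++ [w]) else kv)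
  else gs ++ [(w, [w])]

-- the groups created from the words of the suffix, given the key words chosen so far
def pvNewKeys (ks : List String) : List String → List (String × List String)
  | [] => []
  | w :: r =>
    if ks.any (fun k => is_equal k w) then pvNewKeys ks r
    else (w, w :: r.filter (fun u => is_equal w u)) :: pvNewKeys (ks ++ [w]) r

theorem is_equal_self (w : String) : is_equal w w = true := by
  simp [is_equal, List.all_eq_true]

theorem foldl_pvStep (r : List String) : ∀ gs : List (String × List String),
    r.foldl pvStep gs =
      gs.map (fun kv => (kv.1, kv.2 ++ r.filter (fun u => is_equal kv.1 u)))
        ++ pvNewKeys (gs.map (·.1)) r := by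
  induction r with
  | nil => intro gs; simp [pvNewKeys]
  | cons w r ih =>
    intro gs
    simp only [List.foldl_cons]
    by_cases h : gs.any (fun kv => is_equal kv.1 w) = true
    · rw [show pvStep gs w
          = gs.map (fun kv => if is_equal kv.1 w then (kv.1, kv.2 ++ [w]) else kv) from by
        simp [pvStep, h]]
      rw [ih]
      congr 1
      · rw [List.map_map]
        apply List.map_congr_left
        intro kv _
        by_cases hk : is_equal kv.1 w = true <;>
          simp [hk, List.filter_cons, Function.comp]
      · have hkeys : (gs.map (fun kv => if is_equal kv.1 w then (kv.1, kv.2 ++ [w]) else kv)).map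
            (·.1) = gs.map (·.1) := by
          rw [List.map_map]
          apply List.map_congr_left
          intro kv _
          by_cases hk : is_equal kv.1 w = true <;> simp [hk, Function.comp]
        rw [hkeys, pvNewKeys]
        have : (gs.map (·.1)).any (fun k => is_equal k w) = true := by
          simpa [List.any_map, Function.comp] using h
        rw [if_pos this]
    · rw [show pvStep gs w = gs ++ [(w, [w])] from by simp [pvStep, h]]
      rw [ih]
      have hnone : ∀ kv ∈ gs, is_equal kv.1 w = false := by
        intro kv hkv
        by_contra hc
        exact h (List.any_eq_true.mpr ⟨kv, hkv, by simpa using hc⟩)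
      have hmap : gs.map (fun kv => (kv.1, kv.2 ++ r.filter (fun u => is_equal kv.1 u)))
          = gs.map (fun kv => (kv.1, kv.2 ++ (w :: r).filter (fun u => is_equal kv.1 u))) := by
        apply List.map_congr_left
        intro kv hkv
        simp [List.filter_cons, hnone kv hkv]
      rw [List.map_append, hmap]
      have hks : ((gs ++ [(w, [w])]).map (fun x => x.1)) = gs.map (·.1) ++ [w] := by simp
      rw [hks]
      conv_rhs => rw [pvNewKeys]
      have : (gs.map (·.1)).any (fun k => is_equal k w) = false := by
        simp only [List.any_map, Function.comp]
        simpa [List.any_eq_false] using hnone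
      rw [if_neg (by simp [this])]
      simp [List.append_assoc]

theorem pvStep_keys (gs : List (String × List String)) (w : String)
    (h : (gs.map (·.1)).Nodup) : ((pvStep gs w).map (·.1)).Nodup := by
  unfold pvStep
  by_cases hm : gs.any (fun kv => is_equal kv.1 w) = true
  · rw [if_pos hm, List.map_map]
    have : gs.map ((·.1) ∘ fun kv => if is_equal kv.1 w then (kv.1, kv.2 ++ [w]) else kv)
        = gs.map (·.1) := by
      apply List.map_congr_left
      intro kv _
      by_cases hk : is_equal kv.1 w = true <;> simp [hk, Function.comp]
    rw [this]; exact h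
  · rw [if_neg hm, List.map_append]
    simp only [List.map_cons, List.map_nil]
    rw [List.nodup_append]
    refine ⟨h, List.nodup_singleton w, ?_⟩
    intro a ha b hb
    rw [List.mem_singleton] at hb
    subst hb
    intro heq
    subst heq
    rcases List.mem_map.mp ha with ⟨kv, hkv, hfst⟩
    apply hm
    exact List.any_eq_true.mpr ⟨kv, hkv, by simp [hfst, is_equal_self]⟩

theorem inner_fold_items (w : String) : ∀ (ks : List String) (e : PySem.Dict String (List String)) (b : Bool),
    e.keys.Nodup → ks.Nodup → (∀ k ∈ ks, e.contains k = true) →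
    (ks.foldl (fun (st : PySem.Dict String (List String) × Bool) key =>
        if is_equal key w then (st.1.modify key [] (fun l => l ++ [w]), false)
        else st) (e, b)) =
      (PySem.Dict.mk (e.items.map (fun kv =>
          if ks.contains kv.1 && is_equal kv.1 w then (kv.1, kv.2 ++ [w]) else kv)),
       b && !(ks.any (fun k => is_equal k w))) := by
  intro ks
  induction ks with
  | nil => intro e b hn _ _; simp
  | cons k ks ih =>
    intro e b hn hks hc
    simp only [List.foldl_cons]
    by_cases hk : is_equal k w = true
    · rw [if_pos hk]
      have hcontk : e.contains k = true := hc k (List.mem_cons_self ..)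
      have hmod : (e.modify k [] (fun l => l ++ [w])).items
          = e.items.map (fun p => if p.1 == k then (p.1, p.2 ++ [w]) else p) := by
        rw [PySem.Dict.modify, PySem.Dict.insert, if_pos hcontk]
        apply List.map_congr_left
        intro p hp
        by_cases hpk : (p.1 == k) = true
        · have hpe : p.1 = k := eq_of_beq hpk
          rw [if_pos hpk, if_pos hpk]
          have hg : e.getD k [] = p.2 := by
            refine PySem.Dict.getD_of_mem_items e ?_ hn []
            rw [← hpe]; exact hp
          rw [hg, hpe]
        · rw [if_neg hpk, if_neg hpk]
      rw [ih (e.modify k [] (fun l => l ++ [w])) false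
          (by rw [PySem.Dict.keys_modify, PySem.Dict.keys_insert_of_contains _ _ hcontk]; exact hn)
          (List.Nodup.of_cons hks)
          (by intro k' hk'; rw [PySem.Dict.contains_modify]; simp [hc k' (List.mem_cons_of_mem _ hk')])]
      have hknots : k ∉ ks := (List.nodup_cons.mp hks).1
      have hitems : (e.items.map (fun p => if (p.1 == k) = true then (p.1, p.2 ++ [w]) else p)).map
            (fun kv => if (ks.contains kv.1 && is_equal kv.1 w) = true then (kv.1, kv.2 ++ [w]) else kv)
          = e.items.map (fun kv =>
              if ((k :: ks).contains kv.1 && is_equal kv.1 w) = true then (kv.1, kv.2 ++ [w]) else kv) := by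
        rw [List.map_map]
        apply List.map_congr_left
        intro p _
        by_cases hpk : (p.1 == k) = true
        · have hpe : p.1 = k := eq_of_beq hpk
          simp [Function.comp, hpe, hk, hknots]
        · have hpe : p.1 ≠ k := by simpa using hpk
          simp [Function.comp, hpk, List.contains_cons, hpe]
      rw [Prod.mk.injEq]
      exact ⟨by rw [hmod, hitems], by simp [hk]⟩
    · rw [if_neg hk]
      rw [ih e b hn (List.Nodup.of_cons hks)
          (fun k' hk' => hc k' (List.mem_cons_of_mem _ hk'))]
      have hkf : is_equal k w = false := by simpa using hk
      have hitems : e.items.map (fun kv =>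
            if (ks.contains kv.1 && is_equal kv.1 w) = true then (kv.1, kv.2 ++ [w]) else kv)
          = e.items.map (fun kv =>
              if ((k :: ks).contains kv.1 && is_equal kv.1 w) = true then (kv.1, kv.2 ++ [w]) else kv) := by
        apply List.map_congr_left
        intro p _
        by_cases hpk : (p.1 == k) = true
        · have hpe : p.1 = k := eq_of_beq hpk
          simp [List.contains_cons, hpe, hkf]
        · have hpe : p.1 ≠ k := by simpa using hpk
          simp [List.contains_cons, hpe]
      rw [Prod.mk.injEq]
      exact ⟨by rw [hitems], by simp [hkf]⟩

theorem stepA_items (w : String) (d : PySem.Dict String (List String)) (h : d.keys.Nodup) :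
    (if d.size == 0 then d.insert w [w]
     else
       let st := d.keys.foldl
         (fun (st : PySem.Dict String (List String) × Bool) key =>
           if is_equal key w then (st.1.modify key [] (fun l => l ++ [w]), false)
           else st) (d, true)
       if st.2 then st.1.insert w [w] else st.1).items = pvStep d.items w := by
  by_cases hz : (d.size == 0) = true
  · have hnil : d.items = [] := List.eq_nil_of_length_eq_zero (beq_iff_eq.mp hz)
    rw [if_pos hz, PySem.Dict.insert, PySem.Dict.contains, hnil]
    simp [pvStep]
  · rw [if_neg hz]
    have hfold := inner_fold_items w d.keys d true h h
      (fun k hk => (PySem.Dict.contains_iff_mem_keys d k).mpr hk)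
    simp only [hfold]
    have hmapc : d.items.map (fun kv =>
          if (d.keys.contains kv.1 && is_equal kv.1 w) = true then (kv.1, kv.2 ++ [w]) else kv)
        = d.items.map (fun kv => if is_equal kv.1 w then (kv.1, kv.2 ++ [w]) else kv) := by
      apply List.map_congr_left
      intro kv hkv
      have hmem : kv.1 ∈ d.keys := by
        simp only [PySem.Dict.keys]
        exact List.mem_map_of_mem hkv
      have hck : d.keys.contains kv.1 = true := by simpa [List.contains_iff_mem] using hmem
      rw [hck]
      simp
    have hany : (d.keys.any fun k => is_equal k w) = (d.items.any fun kv => is_equal kv.1 w) := by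
      simp only [PySem.Dict.keys, List.any_map]
      rfl
    by_cases hm : (d.items.any fun kv => is_equal kv.1 w) = true
    · rw [hany, hm]
      simp only [Bool.true_and, Bool.not_true, Bool.and_false, Bool.and_true]
      rw [if_neg (by simp), pvStep, if_pos hm]
      exact congrArg PySem.Dict.items (congrArg PySem.Dict.mk hmapc)
    · have hmf : (d.items.any fun kv => is_equal kv.1 w) = false := by simpa using hm
      have hid : d.items.map (fun kv =>
            if (d.keys.contains kv.1 && is_equal kv.1 w) = true then (kv.1, kv.2 ++ [w]) else kv)
          = d.items := by
        rw [hmapc]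
        apply List.map_congr_left ?_ |>.trans (List.map_id d.items)
        intro kv hkv
        have : is_equal kv.1 w = false := by
          rcases List.any_eq_false.mp hmf kv hkv with h'
          simpa using h'
        simp [this]
      rw [hany, hmf]
      simp only [Bool.not_false, Bool.and_true]
      rw [if_pos trivial, PySem.Dict.insert]
      have hcw : (PySem.Dict.mk (d.items.map (fun kv =>
          if (d.keys.contains kv.1 && is_equal kv.1 w) = true then (kv.1, kv.2 ++ [w]) else kv))
          : PySem.Dict String (List String)).contains w = false := by
        simp only [PySem.Dict.contains, hid]
        apply List.any_eq_false.mpr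
        intro p hp
        intro hc
        have hpe : p.1 = w := eq_of_beq hc
        have : is_equal p.1 w = false := by
          rcases List.any_eq_false.mp hmf p hp with h'
          simpa using h'
        rw [hpe, is_equal_self] at this
        exact Bool.true_eq_false.mp this
      rw [if_neg (by rw [hcw]; simp)]
      simp only [hid]
      rw [pvStep, if_neg (by simp [hmf])]

theorem pvKeys_eq (d : PySem.Dict String (List String)) :
    d.keys = d.items.map (fun x => x.1) := rfl

theorem foldl_pvStep_keys_nodup (lst : List String) :
    ∀ gs : List (String × List String), (gs.map (·.1)).Nodup →
    ((lst.foldl pvStep gs).map (·.1)).Nodup := by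
  induction lst with
  | nil => intro gs h; exact h
  | cons w r ih => intro gs h; exact ih (pvStep gs w) (pvStep_keys gs w h)

theorem foldA_items (lst : List String) : ∀ (d : PySem.Dict String (List String)), d.keys.Nodup →
    (lst.foldl (fun (wd : PySem.Dict String (List String)) word =>
      if wd.size == 0 then wd.insert word [word]
      else
        let st := wd.keys.foldl
          (fun (st : PySem.Dict String (List String) × Bool) key =>
            if is_equal key word then (st.1.modify key [] (fun l => l ++ [word]), false)
            else st) (wd, true)
        if st.2 then st.1.insert word [word] else st.1) d).items
    = lst.foldl pvStep d.items := by
  induction lst with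
  | nil => intro d h; rfl
  | cons w r ih =>
    intro d h
    simp only [List.foldl_cons]
    have hstep := stepA_items w d h
    have hnodup : ((pvStep d.items w).map (·.1)).Nodup := by
      apply pvStep_keys
      simpa [PySem.Dict.keys] using h
    rw [ih _ (by rw [pvKeys_eq, hstep]; exact hnodup), hstep]

theorem final_loop (d : PySem.Dict String (List String)) (h : d.keys.Nodup) :
    d.keys.foldl (fun res key =>
      if (d.getD key []).length > 1 then res ++ [d.getD key []] else res) []
    = d.items.foldl (fun res kv => if kv.2.length > 1 then res ++ [kv.2] else res) [] := by
  rw [PySem.Dict.keys, List.foldl_map]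
  apply PySem.List.foldl_congr_mem
  intro acc kv hkv
  have : d.getD kv.1 [] = kv.2 :=
    PySem.Dict.getD_of_mem_items d (by exact hkv) h []
  rw [this]

theorem issubset_charSet (k w : String) :
    PySem.Set.issubset (charSet w) (charSet k) = is_equal k w := by
  rw [Bool.eq_iff_iff]
  simp [charSet, is_equal, PySem.Set.issubset_iff, List.all_eq_true, PySem.Set.mem_ofList]

def pvNewKeysB (lst ks : List String) : List String → Nat → List (String × PySem.Set Char × List String)
  | [], _ => []
  | w :: r, n =>
    if ks.any (fun k => is_equal k w) then pvNewKeysB lst ks r (n + 1)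
    else (w, charSet w, lst.drop (n + 1)) :: pvNewKeysB lst (ks ++ [w]) r (n + 1)

theorem foldB_keys (lst : List String) : ∀ (r : List String) (n : Nat)
    (K : List (String × PySem.Set Char × List String)),
    r = lst.drop n →
    (∀ e ∈ K, e.2.1 = charSet e.1) →
    (PySem.List.enumerate r (n : Int)).foldl
      (fun (keys : List (String × PySem.Set Char × List String)) iw =>
        if keys.all (fun k => !(PySem.Set.issubset (charSet iw.2) k.2.1)) then
          keys ++ [(iw.2, charSet iw.2, PySem.List.slice lst (some (iw.1 + 1)) none)]
        else keys) K
    = K ++ pvNewKeysB lst (K.map (·.1)) r n := by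
  intro r
  induction r with
  | nil => intro n K _ _; simp [pvNewKeysB]
  | cons w rr ih =>
    intro n K hdrop hK
    rw [PySem.List.enumerate_cons, List.foldl_cons]
    have hrr : rr = lst.drop (n + 1) := by
      have := congrArg List.tail hdrop
      simpa [List.tail_drop] using this
    have hcast : ((n : Int) + 1) = ((n + 1 : Nat) : Int) := by push_cast; ring
    have hcond : (K.all (fun k => !(PySem.Set.issubset (charSet w) k.2.1)))
        = !((K.map (·.1)).any (fun k => is_equal k w)) := by
      rw [Bool.eq_iff_iff]
      simp only [List.all_eq_true, Bool.not_eq_eq_eq_not, Bool.not_true, List.any_map,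
        Bool.not_eq_true, List.any_eq_false, Function.comp]
      constructor
      · intro h kv hkv
        rw [← issubset_charSet, ← hK kv hkv]
        exact h kv hkv
      · intro h kv hkv
        rw [hK kv hkv, issubset_charSet]
        exact h kv hkv
    by_cases hm : ((K.map (·.1)).any (fun k => is_equal k w)) = true
    · have hcf : (K.all (fun k => !(PySem.Set.issubset (charSet w) k.2.1))) = false := by
        rw [hcond, hm]; rfl
      rw [if_neg (by rw [hcf]; simp), hcast, ih (n + 1) K hrr hK]
      conv_rhs => rw [pvNewKeysB, if_pos hm]
    · have hmf : ((K.map (·.1)).any (fun k => is_equal k w)) = false := by simpa using hm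
      rw [if_pos (by rw [hcond, hmf]; rfl)]
      have hslice : PySem.List.slice lst (some ((n : Int) + 1)) none = lst.drop (n + 1) := by
        rw [hcast]
        exact PySem.List.slice_from_natCast lst (n + 1)
      rw [hslice, hcast]
      rw [ih (n + 1) (K ++ [(w, charSet w, lst.drop (n + 1))]) hrr
          (by intro e he
              rcases List.mem_append.mp he with h' | h'
              · exact hK e h'
              · rw [List.mem_singleton] at h'; subst h'; rfl)]
      conv_rhs => rw [pvNewKeysB, if_neg (by simp [hmf])]
      simp [List.append_assoc]

theorem newKeysB_to_newKeys (lst : List String) : ∀ (r : List String) (n : Nat) (ks : List String),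
    r = lst.drop n →
    (pvNewKeysB lst ks r n).map (fun e =>
        (e.1, e.1 :: e.2.2.filter (fun u => PySem.Set.issubset (charSet u) e.2.1)))
    = pvNewKeys ks r := by
  intro r
  induction r with
  | nil => intro n ks _; simp [pvNewKeysB, pvNewKeys]
  | cons w rr ih =>
    intro n ks hdrop
    have hrr : rr = lst.drop (n + 1) := by
      have := congrArg List.tail hdrop
      simpa [List.tail_drop] using this
    by_cases hm : (ks.any (fun k => is_equal k w)) = true
    · rw [pvNewKeysB, if_pos hm, pvNewKeys, if_pos hm]
      exact ih (n + 1) ks hrr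
    · rw [pvNewKeysB, if_neg hm, pvNewKeys, if_neg hm]
      rw [List.map_cons, ih (n + 1) (ks ++ [w]) hrr]
      congr 1
      simp only [← hrr]
      congr 1
      congr 1
      apply List.filter_congr
      intro u _
      rw [issubset_charSet]

theorem A_eq_canon (lst : List String) :
    palabras_iguales lst
    = (lst.foldl pvStep []).foldl
        (fun res kv => if kv.2.length > 1 then res ++ [kv.2] else res) [] := by
  rw [palabras_iguales]
  have h0 : (PySem.Dict.mk [] : PySem.Dict String (List String)).keys.Nodup := by
    simp [pvKeys_eq]
  have hitems := foldA_items lst (PySem.Dict.mk []) h0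
  have hnd : (lst.foldl (fun (wd : PySem.Dict String (List String)) word =>
      if wd.size == 0 then wd.insert word [word]
      else
        let st := wd.keys.foldl
          (fun (st : PySem.Dict String (List String) × Bool) key =>
            if is_equal key word then (st.1.modify key [] (fun l => l ++ [word]), false)
            else st) (wd, true)
        if st.2 then st.1.insert word [word] else st.1) (PySem.Dict.mk [])).keys.Nodup := by
    rw [pvKeys_eq, hitems]
    exact foldl_pvStep_keys_nodup lst [] (by simp)
  rw [final_loop _ hnd, hitems]

theorem B_eq_canon (lst : List String) :
    palabras_iguales_alt lst
    = (pvNewKeys [] lst).foldl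
        (fun res kv => if kv.2.length > 1 then res ++ [kv.2] else res) [] := by
  rw [palabras_iguales_alt]
  have hfold := foldB_keys lst lst 0 [] (by simp) (by simp)
  rw [show ((0 : Nat) : Int) = (0 : Int) by norm_num] at hfold
  rw [hfold, List.nil_append,
    ← newKeysB_to_newKeys lst lst 0 [] (by simp), List.foldl_map]
  rfl

-- ===== VERDICT (by name: the statement is the Claim_ definition above) =====
theorem palabras_iguales_spec : Claim_equal_palabras_iguales := by
  intro lst _
  show palabras_iguales lst = palabras_iguales_alt lst
  rw [A_eq_canon, B_eq_canon]
  rw [foldl_pvStep lst []]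
  simp [pvNewKeys]
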